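-- pv_equiv track=rewrite | github.com/miliar/Code_Jam_Webscraper | solutions_python/solutions_year16_round0_nr2/2203.py | get_flips
-- ===== SOURCE A (Python) =====
-- def list_rindex(l, v):
-- 	try:
-- 		return len(l) -1 - l[::-1].index(v)
-- 	except ValueError:
-- 		raise
--
-- def get_flips(S):
-- 	i = 0
-- 	while True:
-- 		try:
-- 			n = list_rindex(S,0)
-- 			S[:n+1] = [0 if i == 1 else 1 for i in S[:n+1]]
-- 			i+=1
-- 		except ValueError:
-- 			break
-- 	return i
-- ===== SOURCE B (Python) =====
-- def get_flips(S):
--     flips = 0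
--     seen_zero = False
--     prev = False
--     for x in reversed(S):
--         if not seen_zero:
--             if x == 0:
--                 seen_zero = True
--                 flips = 1
--         else:
--             bx = (x == 1)
--             if bx != prev:
--                 flips += 1
--                 prev = bx
--     return flips
-- ===== Notes on version B (the rewrite author's own statement) =====
-- stated objective: alternative
-- what changed: Replaces the repeated find-last-zero-and-flip-prefix simulation by a single right-to-left pass that counts value-class transitions after the last zero, reading the answer off directly without ever rewriting the list.
import Mathlib
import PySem

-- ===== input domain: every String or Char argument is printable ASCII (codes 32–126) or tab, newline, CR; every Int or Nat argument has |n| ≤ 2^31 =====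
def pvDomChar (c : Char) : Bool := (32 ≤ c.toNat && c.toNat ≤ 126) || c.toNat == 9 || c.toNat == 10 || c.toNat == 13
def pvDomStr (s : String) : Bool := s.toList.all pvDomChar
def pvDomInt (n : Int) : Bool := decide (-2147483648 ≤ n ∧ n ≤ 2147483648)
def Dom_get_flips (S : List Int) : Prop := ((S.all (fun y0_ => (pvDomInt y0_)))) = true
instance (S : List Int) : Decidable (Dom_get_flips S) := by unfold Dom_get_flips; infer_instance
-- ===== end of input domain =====

-- B replaces A's repeated flip-prefix simulation by a single right-to-left transition-counting pass.
-- Python A mutates its argument S in place (slice assignment); B does not. The equivalence proved here is about the RETURN value only.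

-- ===== PORT A =====
-- [0 if i == 1 else 1 for i in …] maps this function over the prefix
def pvFlip (x : Int) : Int := if x == 1 then 0 else 1

-- list_rindex(l, v); l[::-1] is l.reverse (PySem.List.slice?_none_none_neg_one); none = the propagated ValueError
def list_rindex (l : List Int) (v : Int) : Option Int :=
  (PySem.List.index? l.reverse v).map (fun k => (l.length : Int) - 1 - (k : Int))

-- the 'while True' loop; fuel is only a totality guard (iterations ≤ length + 1, lemma pvScan1_le_length below)
def flipsLoop : Nat → List Int → Int → Int
  | 0, _, i => i
  | fuel + 1, S, i =>
    match list_rindex S 0 with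
    | some n =>
        flipsLoop fuel
          ((PySem.List.slice S (some 0) (some (n + 1))).map pvFlip
            ++ PySem.List.slice S (some (n + 1)) none) (i + 1)
    | none => i

def get_flips (S : List Int) : Int := flipsLoop (S.length + 1) S 0

-- ===== PORT B =====
-- loop body of B: state (seen_zero, prev, flips)
def pvStepB (st : Bool × Bool × Int) (x : Int) : Bool × Bool × Int :=
  if !st.1 then
    if x == 0 then (true, st.2.1, 1) else st
  else
    let bx := x == 1
    if bx != st.2.1 then (st.1, bx, st.2.2 + 1) else st

def get_flips_alt (S : List Int) : Int :=
  (S.reverse.foldl pvStepB (false, false, 0)).2.2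

-- ===== PRECONDITION & SPEC =====
def Spec_get_flips (S : List Int) (out : Int) : Prop := out = get_flips_alt S
instance (S : List Int) (out : Int) : Decidable (Spec_get_flips S out) := by unfold Spec_get_flips; infer_instance

-- ===== CLAIM (what is proved, stated in full; the proofs are below) =====
def Claim_equal_get_flips : Prop := ∀ (S : List Int), Dom_get_flips S → Spec_get_flips S (get_flips S)

-- ===== LEMMAS AND PROOFS =====

-- transition-counting phase of B (after the last 0 has been seen, scanning towards the front)
def pvScan2 : List Int → Bool → Int → Int
  | [], _, f => f
  | x :: r, prev, f => if (x == 1) != prev then pvScan2 r (x == 1) (f + 1) else pvScan2 r prev f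

-- B's whole pass, as recursion on the reversed list
def pvScan1 : List Int → Int
  | [] => 0
  | x :: r => if x == 0 then pvScan2 r false 1 else pvScan1 r

lemma stepB_true (prev : Bool) (f : Int) (x : Int) :
    pvStepB (true, prev, f) x = if (x == 1) != prev then (true, x == 1, f + 1) else (true, prev, f) := by
  by_cases h : ((x == 1) != prev) = true <;> simp [pvStepB, h]

lemma stepB_false (prev : Bool) (f : Int) (x : Int) :
    pvStepB (false, prev, f) x = if x == 0 then (true, prev, 1) else (false, prev, f) := by
  by_cases h : (x == 0) = true <;> simp [pvStepB, h]

lemma foldl_phase2 (l : List Int) : ∀ (prev : Bool) (f : Int),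
    (l.foldl pvStepB (true, prev, f)).2.2 = pvScan2 l prev f := by
  induction l with
  | nil => intro prev f; simp [pvScan2]
  | cons x r ih =>
    intro prev f
    rw [List.foldl_cons, stepB_true]
    simp only [pvScan2]
    by_cases h : ((x == 1) != prev) = true
    · rw [if_pos h, if_pos h, ih]
    · rw [if_neg h, if_neg h, ih]

lemma foldl_phase1 (l : List Int) :
    (l.foldl pvStepB (false, false, 0)).2.2 = pvScan1 l := by
  induction l with
  | nil => simp [pvScan1]
  | cons x r ih =>
    rw [List.foldl_cons, stepB_false]
    simp only [pvScan1]
    by_cases h : (x == 0) = true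
    · rw [if_pos h, if_pos h, foldl_phase2]
    · rw [if_neg h, if_neg h, ih]

lemma alt_eq_scan1 (S : List Int) : get_flips_alt S = pvScan1 S.reverse := by
  unfold get_flips_alt
  rw [foldl_phase1]

lemma pvScan2_offset (l : List Int) : ∀ (prev : Bool) (f c : Int),
    pvScan2 l prev (f + c) = pvScan2 l prev f + c := by
  induction l with
  | nil => intro prev f c; simp [pvScan2]
  | cons x r ih =>
    intro prev f c
    simp only [pvScan2]
    by_cases h : ((x == 1) != prev) = true
    · rw [if_pos h, if_pos h]
      have e : f + c + 1 = (f + 1) + c := by ring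
      rw [e, ih]
    · rw [if_neg h, if_neg h, ih]

lemma pvScan2_ge (l : List Int) : ∀ (prev : Bool) (f : Int), f ≤ pvScan2 l prev f := by
  induction l with
  | nil => intro prev f; simp [pvScan2]
  | cons x r ih =>
    intro prev f
    simp only [pvScan2]
    split
    · have := ih (x == 1) (f + 1); omega
    · exact ih _ _

lemma pvScan2_le (l : List Int) : ∀ (prev : Bool) (f : Int),
    pvScan2 l prev f ≤ f + l.length := by
  induction l with
  | nil => intro prev f; simp [pvScan2]
  | cons x r ih =>
    intro prev f
    simp only [pvScan2, List.length_cons]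
    split
    · have := ih (x == 1) (f + 1); push_cast; push_cast at this; omega
    · have := ih prev f; push_cast; push_cast at this; omega

lemma pvScan1_nonneg (l : List Int) : 0 ≤ pvScan1 l := by
  induction l with
  | nil => simp [pvScan1]
  | cons x r ih =>
    simp only [pvScan1]
    split
    · have := pvScan2_ge r false 1; omega
    · exact ih

lemma pvScan1_le_length (l : List Int) : pvScan1 l ≤ l.length := by
  induction l with
  | nil => simp [pvScan1]
  | cons x r ih =>
    simp only [pvScan1, List.length_cons]
    split
    · have := pvScan2_le r false 1; push_cast; push_cast at this; omega
    · push_cast; push_cast at ih; omega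

lemma pvScan1_of_not_mem (l : List Int) (h : (0 : Int) ∉ l) : pvScan1 l = 0 := by
  induction l with
  | nil => simp [pvScan1]
  | cons x r ih =>
    simp only [pvScan1]
    have hx : ¬ (x == 0) = true := by simp; intro hx; exact h (by simp [hx])
    rw [if_neg hx]
    exact ih (fun hm => h (List.mem_cons_of_mem _ hm))

lemma pvScan1_append_no_zero (u w : List Int) (h : (0 : Int) ∉ u) :
    pvScan1 (u ++ w) = pvScan1 w := by
  induction u with
  | nil => simp
  | cons x r ih =>
    simp only [List.cons_append, pvScan1]
    have hx : ¬ (x == 0) = true := by simp; intro hx; exact h (by simp [hx])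
    rw [if_neg hx]
    exact ih (fun hm => h (List.mem_cons_of_mem _ hm))

lemma flip_beq_one (x : Int) : (pvFlip x == 1) = !(x == 1) := by
  by_cases h : (x == 1) = true
  · simp at h; simp [pvFlip, h]
  · simp at h; simp [pvFlip, h]

lemma pvScan2_flip (l : List Int) : ∀ (prev : Bool) (f : Int),
    pvScan2 (l.map pvFlip) prev f = pvScan2 l (!prev) f := by
  induction l with
  | nil => intro prev f; simp [pvScan2]
  | cons x r ih =>
    intro prev f
    simp only [List.map_cons, pvScan2, flip_beq_one]
    by_cases h : ((x == 1) != !prev) = true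
    · have h' : ((!(x == 1)) != prev) = true := by
        cases hx : (x == 1) <;> cases hp : prev <;> simp_all
      rw [if_pos h', if_pos h, ih]
      simp
    · have h' : ¬ ((!(x == 1)) != prev) = true := by
        cases hx : (x == 1) <;> cases hp : prev <;> simp_all
      rw [if_neg h', if_neg h, ih]

lemma flip_ne_zero_of_not_one (v : List Int) (h : (1 : Int) ∉ v) :
    (0 : Int) ∉ v.map pvFlip := by
  intro hm
  rcases List.mem_map.mp hm with ⟨x, hx, hfx⟩
  by_cases h1 : (x == 1) = true
  · simp at h1; exact h (h1 ▸ hx)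
  · simp [pvFlip, h1] at hfx

lemma pvScan2_no_one (v : List Int) (h : (1 : Int) ∉ v) : ∀ f, pvScan2 v false f = f := by
  induction v with
  | nil => intro f; simp [pvScan2]
  | cons x r ih =>
    intro f
    simp only [pvScan2]
    have hx : ¬ ((x == 1) != false) = true := by
      simp; intro hx; exact absurd (hx ▸ List.mem_cons_self) h
    rw [if_neg hx]
    exact ih (fun hm => h (List.mem_cons_of_mem _ hm)) f

lemma pvScan2_with_one (v : List Int) (h : (1 : Int) ∈ v) : ∀ f,
    pvScan2 v false f = f + pvScan1 (v.map pvFlip) := by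
  induction v with
  | nil => cases h
  | cons x r ih =>
    intro f
    simp only [pvScan2, List.map_cons]
    by_cases h1 : (x == 1) = true
    · rw [if_pos (by simp [h1])]
      have hflip : pvFlip x = 0 := by simp [pvFlip, h1]
      simp only [pvScan1, hflip]
      rw [if_pos (by simp)]
      rw [pvScan2_flip]
      simp only [Bool.not_false]
      have e : f + 1 = 1 + f := by ring
      rw [e, h1, pvScan2_offset r true 1 f]
      ring
    · have hx : ¬ ((x == 1) != false) = true := by simp_all
      rw [if_neg hx]
      have hmem : (1 : Int) ∈ r := by
        cases h with
        | head => exact absurd (by simp) h1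
        | tail _ hm => exact hm
      have hflip : pvFlip x = 1 := by simp [pvFlip, h1]
      simp only [pvScan1, hflip]
      rw [if_neg (by simp)]
      exact ih hmem f

-- the single flip step of A, seen on the reversed list
lemma step_shape (S : List Int) (n : Int) (h : list_rindex S 0 = some n) :
    ∃ pre suf : List Int, S.reverse = pre ++ 0 :: suf ∧ (0 : Int) ∉ pre ∧
      ((PySem.List.slice S (some 0) (some (n + 1))).map pvFlip
        ++ PySem.List.slice S (some (n + 1)) none).reverse
        = pre ++ 1 :: suf.map pvFlip := by
  unfold list_rindex at h
  cases hk : PySem.List.index? S.reverse 0 with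
  | none => rw [hk] at h; simp at h
  | some k =>
    rw [hk] at h
    simp at h
    rcases (PySem.List.index?_eq_some_iff _ _ _).mp hk with ⟨pre, suf, hrev, hlen, hnm⟩
    refine ⟨pre, suf, hrev, hnm, ?_⟩
    have hS : S = (suf.reverse ++ [0]) ++ pre.reverse := by
      have := congrArg List.reverse hrev
      simpa [List.reverse_append] using this
    have hlenS : S.length = k + suf.length + 1 := by
      have hl : S.reverse.length = S.length := List.length_reverse
      rw [hrev] at hl; simp at hl; omega
    have hn1 : n + 1 = ((suf.length + 1 : Nat) : Int) := by
      rw [← h, hlenS]; push_cast; ring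
    rw [hn1]
    rw [PySem.List.slice_zero_start, PySem.List.slice_to_natCast, PySem.List.slice_from_natCast]
    have htake : S.take (suf.length + 1) = suf.reverse ++ [0] := by
      rw [hS]; exact List.take_left' (by simp)
    have hdrop : S.drop (suf.length + 1) = pre.reverse := by
      rw [hS]; exact List.drop_left' (by simp)
    rw [htake, hdrop]
    rw [List.reverse_append, List.reverse_reverse, ← List.map_reverse]
    have e : (suf.reverse ++ ([0] : List Int)).reverse = 0 :: suf := by simp
    rw [e]
    simp [pvFlip]

lemma step_scan (S : List Int) (n : Int) (h : list_rindex S 0 = some n) :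
    pvScan1 (((PySem.List.slice S (some 0) (some (n + 1))).map pvFlip
        ++ PySem.List.slice S (some (n + 1)) none).reverse)
      = pvScan1 S.reverse - 1 := by
  rcases step_shape S n h with ⟨pre, suf, hrev, hnm, hstep⟩
  rw [hstep, hrev]
  rw [pvScan1_append_no_zero pre _ hnm, pvScan1_append_no_zero pre _ hnm]
  have e1 : pvScan1 ((1 : Int) :: suf.map pvFlip) = pvScan1 (suf.map pvFlip) := by
    simp only [pvScan1]; rw [if_neg (by simp)]
  have e2 : pvScan1 ((0 : Int) :: suf) = pvScan2 suf false 1 := by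
    simp only [pvScan1]; rw [if_pos (by simp)]
  rw [e1, e2]
  by_cases h1 : (1 : Int) ∈ suf
  · rw [pvScan2_with_one suf h1 1]; ring
  · rw [pvScan2_no_one suf h1 1]
    rw [pvScan1_of_not_mem _ (flip_ne_zero_of_not_one suf h1)]
    norm_num

lemma loop_eq : ∀ (fuel : Nat) (S : List Int) (i : Int),
    pvScan1 S.reverse ≤ (fuel : Int) → flipsLoop fuel S i = i + pvScan1 S.reverse := by
  intro fuel
  induction fuel with
  | zero =>
    intro S i hle
    have := pvScan1_nonneg S.reverse
    simp only [flipsLoop]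
    omega
  | succ fuel ih =>
    intro S i hle
    cases h : list_rindex S 0 with
    | none =>
      have hnone : PySem.List.index? S.reverse 0 = none := by
        unfold list_rindex at h
        cases hidx : PySem.List.index? S.reverse 0 with
        | none => rfl
        | some k => rw [hidx] at h; simp at h
      have hnm : (0 : Int) ∉ S.reverse := (PySem.List.index?_eq_none_iff _ _).mp hnone
      simp only [flipsLoop, h]
      rw [pvScan1_of_not_mem _ hnm]
      ring
    | some n =>
      have hstep := step_scan S n h
      simp only [flipsLoop, h]
      rw [ih _ (i + 1) (by rw [hstep]; push_cast at hle; omega), hstep]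
      ring

-- ===== VERDICT (by name: the statement is the Claim_ definition above) =====
theorem get_flips_spec : Claim_equal_get_flips := by
  intro S _
  unfold Spec_get_flips
  rw [alt_eq_scan1, get_flips, loop_eq]
  · ring
  · have h1 := pvScan1_le_length S.reverse
    have h2 : S.reverse.length = S.length := List.length_reverse
    omega
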